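-- pv_equiv track=rewrite | github.com/csllpr/cofkit | src/cofkit/reaction_realization.py | _merge_removed_atom_ids
-- ===== SOURCE A (Python) =====
-- from collections import Counter, defaultdict
-- from typing import Callable, Mapping
--
-- def _merge_removed_atom_ids(
--
--     base_removed_atom_ids: Mapping[str, set[int]],
--     extra_removed_atom_ids: Mapping[str, set[int]],
-- ) -> dict[str, set[int]]:
--     merged: dict[str, set[int]] = defaultdict(set)
--     for source in (base_removed_atom_ids, extra_removed_atom_ids):
--         for instance_id, atom_ids in source.items():
--             merged[instance_id].update(atom_ids)
--     return merged
-- ===== SOURCE B (Python) =====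
-- from collections import defaultdict
--
--
-- def _merge_removed_atom_ids(base_removed_atom_ids, extra_removed_atom_ids):
--     keys = dict.fromkeys(base_removed_atom_ids) | dict.fromkeys(extra_removed_atom_ids)
--     return defaultdict(set, {
--         k: set(base_removed_atom_ids.get(k, ())) | set(extra_removed_atom_ids.get(k, ()))
--         for k in keys
--     })
-- ===== Notes on version B (the rewrite author's own statement) =====
-- stated objective: alternative
-- what changed: Instead of sweeping both source mappings and updating per-key set accumulators in a defaultdict, B first computes the ordered union of the keys (base keys, then new extra keys) and builds the result in a single comprehension over those keys, each value the union of the two looked-up sets.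
import Mathlib
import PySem

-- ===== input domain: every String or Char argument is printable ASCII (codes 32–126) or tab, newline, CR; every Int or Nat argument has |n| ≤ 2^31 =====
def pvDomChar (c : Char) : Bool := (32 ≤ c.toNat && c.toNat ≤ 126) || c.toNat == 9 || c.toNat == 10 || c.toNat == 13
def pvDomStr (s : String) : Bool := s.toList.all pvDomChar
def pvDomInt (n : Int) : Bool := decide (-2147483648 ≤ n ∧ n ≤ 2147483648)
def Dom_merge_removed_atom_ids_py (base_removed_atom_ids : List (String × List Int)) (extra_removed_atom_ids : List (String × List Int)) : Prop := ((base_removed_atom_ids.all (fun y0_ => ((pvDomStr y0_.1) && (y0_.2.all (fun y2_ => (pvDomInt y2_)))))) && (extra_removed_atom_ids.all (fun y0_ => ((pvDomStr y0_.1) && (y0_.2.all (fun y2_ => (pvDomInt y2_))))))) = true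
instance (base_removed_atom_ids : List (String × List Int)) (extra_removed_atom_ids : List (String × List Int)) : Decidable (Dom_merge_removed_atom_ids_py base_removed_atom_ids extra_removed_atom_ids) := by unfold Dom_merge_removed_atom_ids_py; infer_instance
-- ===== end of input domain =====

-- B builds the merged mapping in one pass over the ordered union of keys (base keys then new
-- extra keys), looking each key up in both inputs, instead of A's sweep over both sources that
-- updates per-key accumulators in a defaultdict; same cost, different decomposition (objective:
-- alternative).


-- ===== PORT A =====
-- one iteration of A's inner loop: merged[instance_id].update(atom_ids)
-- (defaultdict access creates the empty set; .update adds the ids one by one)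
def mergeStepA (merged : PySem.Dict String (List Int)) (kv : String × List Int) :
    PySem.Dict String (List Int) :=
  merged.modify kv.1 [] (fun s => PySem.Set.update s kv.2)

def merge_removed_atom_ids_py (base_removed_atom_ids : List (String × List Int)) (extra_removed_atom_ids : List (String × List Int)) : List (String × List Int) :=
  (([base_removed_atom_ids, extra_removed_atom_ids]).foldl
      (fun merged source => source.foldl mergeStepA merged) PySem.Dict.empty).items

-- ===== PORT B =====
def merge_removed_atom_ids_py_alt (base_removed_atom_ids : List (String × List Int)) (extra_removed_atom_ids : List (String × List Int)) : List (String × List Int) :=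
  -- keys = dict.fromkeys(base) | dict.fromkeys(extra)  (ordered union of the key lists)
  let keys := PySem.List.dedup
      (base_removed_atom_ids.map Prod.fst ++ extra_removed_atom_ids.map Prod.fst)
  -- {k: set(base.get(k, ())) | set(extra.get(k, ())) for k in keys}
  keys.map (fun k =>
    (k, PySem.Set.union
          (PySem.Set.ofList ((PySem.Dict.mk base_removed_atom_ids).getD k []))
          ((PySem.Dict.mk extra_removed_atom_ids).getD k [])))

-- ===== PRECONDITION & SPEC =====
-- Pre_ excludes association lists with duplicate keys: they do not represent a Python dict
-- (dict construction collapses them, last value winning), so A's value on them is accidental.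
def Pre_merge_removed_atom_ids_py (base_removed_atom_ids : List (String × List Int)) (extra_removed_atom_ids : List (String × List Int)) : Prop :=
  (base_removed_atom_ids.map Prod.fst).Nodup ∧ (extra_removed_atom_ids.map Prod.fst).Nodup
instance (base_removed_atom_ids : List (String × List Int)) (extra_removed_atom_ids : List (String × List Int)) : Decidable (Pre_merge_removed_atom_ids_py base_removed_atom_ids extra_removed_atom_ids) := by unfold Pre_merge_removed_atom_ids_py; infer_instance

def pvWitness_merge_removed_atom_ids_py : (List (String × List Int)) × (List (String × List Int)) :=
  ([("a", [1, 2]), ("b", [3])], [("b", [4]), ("c", [5])])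

def Spec_merge_removed_atom_ids_py (base_removed_atom_ids : List (String × List Int)) (extra_removed_atom_ids : List (String × List Int)) (out : List (String × List Int)) : Prop := out = merge_removed_atom_ids_py_alt base_removed_atom_ids extra_removed_atom_ids
instance (base_removed_atom_ids : List (String × List Int)) (extra_removed_atom_ids : List (String × List Int)) (out : List (String × List Int)) : Decidable (Spec_merge_removed_atom_ids_py base_removed_atom_ids extra_removed_atom_ids out) := by unfold Spec_merge_removed_atom_ids_py; infer_instance

-- ===== CLAIM (what is proved, stated in full; the proofs are below) =====
def Claim_equal_merge_removed_atom_ids_py : Prop := ∀ (base_removed_atom_ids : List (String × List Int)) (extra_removed_atom_ids : List (String × List Int)), Dom_merge_removed_atom_ids_py base_removed_atom_ids extra_removed_atom_ids → Pre_merge_removed_atom_ids_py base_removed_atom_ids extra_removed_atom_ids → Spec_merge_removed_atom_ids_py base_removed_atom_ids extra_removed_atom_ids (merge_removed_atom_ids_py base_removed_atom_ids extra_removed_atom_ids)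

-- ===== LEMMAS AND PROOFS =====

-- a key absent from l's key column is never found
lemma find?_eq_none_of_not_mem_keys (l : List (String × List Int)) (k : String)
    (h : k ∉ l.map Prod.fst) : l.find? (fun p => p.1 == k) = none := by
  apply List.find?_eq_none.mpr
  intro p hp
  simp only [beq_iff_eq]
  intro hpk
  exact h (List.mem_map.mpr ⟨p, hp, hpk⟩)

-- what A's fold over one source does to the entry of a single key k
lemma getD_foldl_mergeStepA (l : List (String × List Int))
    (m : PySem.Dict String (List Int)) (k : String) (h : (l.map Prod.fst).Nodup) :
    (l.foldl mergeStepA m).getD k [] =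
      match l.find? (fun p => p.1 == k) with
      | some p => PySem.Set.update (m.getD k []) p.2
      | none => m.getD k [] := by
  induction l generalizing m with
  | nil => simp
  | cons kv t ih =>
    simp only [List.map_cons, List.nodup_cons] at h
    simp only [List.foldl_cons, List.find?_cons]
    rw [ih _ h.2]
    by_cases hk : kv.1 = k
    · subst hk
      rw [find?_eq_none_of_not_mem_keys t kv.1 h.1]
      simp [mergeStepA, PySem.Dict.modify, PySem.Dict.getD_insert_self]
    · have hbeq : (kv.1 == k) = false := by simp [hk]
      rw [hbeq]
      have : (mergeStepA m kv).getD k [] = m.getD k [] := by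
        simp only [mergeStepA, PySem.Dict.modify]
        exact PySem.Dict.getD_insert_of_ne _ _ _ (Ne.symm hk)
      cases t.find? (fun p => p.1 == k) <;> simp [this]

-- the dict A builds has exactly the deduplicated base-then-extra keys
lemma keys_base (base : List (String × List Int)) :
    (base.foldl mergeStepA PySem.Dict.empty).keys = PySem.Set.ofList (base.map Prod.fst) :=
  (PySem.Dict.keys_foldl_modify_key base Prod.fst []
    (fun _ x s => PySem.Set.update s x.2) PySem.Dict.empty).trans rfl

lemma keys_merge (base extra : List (String × List Int)) :
    (extra.foldl mergeStepA (base.foldl mergeStepA PySem.Dict.empty)).keys =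
      PySem.List.dedup (base.map Prod.fst ++ extra.map Prod.fst) := by
  refine (PySem.Dict.keys_foldl_modify_key extra Prod.fst []
    (fun _ x s => PySem.Set.update s x.2) _).trans ?_
  rw [keys_base]
  simp [PySem.List.dedup, PySem.Set.ofList, PySem.Set.update, List.foldl_append, PySem.Set.empty]

lemma nodup_keys_merge (base extra : List (String × List Int)) :
    (extra.foldl mergeStepA (base.foldl mergeStepA PySem.Dict.empty)).keys.Nodup :=
  PySem.Dict.nodup_keys_foldl_modify_key extra Prod.fst [] _ _
    (PySem.Dict.nodup_keys_foldl_modify_key base Prod.fst [] _ _ (by simp))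

-- per-key agreement between A's accumulated entry and B's two-lookup union
lemma value_merge (base extra : List (String × List Int)) (k : String)
    (hb : (base.map Prod.fst).Nodup) (he : (extra.map Prod.fst).Nodup) :
    (extra.foldl mergeStepA (base.foldl mergeStepA PySem.Dict.empty)).getD k [] =
      PySem.Set.union (PySem.Set.ofList ((PySem.Dict.mk base).getD k []))
        ((PySem.Dict.mk extra).getD k []) := by
  rw [getD_foldl_mergeStepA extra _ k he, getD_foldl_mergeStepA base _ k hb]
  have hlk : ∀ (l : List (String × List Int)),
      (PySem.Dict.mk l).getD k [] = ((l.find? (fun p => p.1 == k)).map Prod.snd).getD [] := by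
    intro l; rfl
  rw [hlk base, hlk extra]
  cases hfb : base.find? (fun p => p.1 == k) <;>
    cases hfe : extra.find? (fun p => p.1 == k) <;>
      simp [PySem.Set.union, PySem.Set.update, PySem.Set.ofList, PySem.Set.empty,
        PySem.Dict.getD_empty]

-- ===== VERDICT (by name: the statement is the Claim_ definition above) =====
theorem merge_removed_atom_ids_py_spec : Claim_equal_merge_removed_atom_ids_py := by
  intro base extra _ hpre
  unfold Spec_merge_removed_atom_ids_py merge_removed_atom_ids_py merge_removed_atom_ids_py_alt
  simp only [List.foldl_cons, List.foldl_nil]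
  rw [PySem.Dict.items_eq_map_keys _ (nodup_keys_merge base extra) [],
    keys_merge base extra]
  apply List.map_congr_left
  intro k _
  rw [value_merge base extra k hpre.1 hpre.2]
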